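-- pv_equiv track=rewrite | github.com/rosasalberto/automatic_translation_server | translation/toxicity.py | token_checker
-- ===== SOURCE A (Python) =====
-- def token_checker(string, toxic_word_list):
--     """
--     Checks the input string for the presence of toxic words from the specified toxic word list.
--
--     Parameters:
--         string (str): The input string to be checked for toxic words.
--         toxic_word_list (list): The toxic word list to be used for checking the input string.
--
--     Returns:
--         list: A list containing the toxic words found in the input string.
--     """
--     l = []
--     toxic_word_list = [" " + x.lower() + " " for x in toxic_word_list]
--     string = " " + string.lower() + " "
--     for w in toxic_word_list:
--         if string.__contains__(w):
--             l += [w]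
--     l = [
--         x.strip(" ") for x in l
--     ]  # removes the token-marking " " pads from the toxic words afterwards
--     return l
-- ===== SOURCE B (Python) =====
-- def token_checker(string, toxic_word_list):
--     """Tokenize the string once; a toxic word is present iff its token sequence
--     occurs contiguously in the token list (single-token words via one set lookup)."""
--     tokens = string.lower().split(" ")
--     token_set = set(tokens)
--
--     def present(parts):
--         if len(parts) == 1:
--             return parts[0] in token_set
--         n = len(parts)
--         return any(tokens[i:i + n] == parts for i in range(len(tokens) - n + 1))
--
--     return [w.lower().strip(" ") for w in toxic_word_list
--             if present(w.lower().split(" "))]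
-- ===== Notes on version B (the rewrite author's own statement) =====
-- stated objective: faster
-- what changed: A scans the whole padded string once per toxic word; B tokenizes the string once, checks single-token words by one hash-set lookup and multi-token words against the token list, so the repeated substring scans disappear.
import Mathlib
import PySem

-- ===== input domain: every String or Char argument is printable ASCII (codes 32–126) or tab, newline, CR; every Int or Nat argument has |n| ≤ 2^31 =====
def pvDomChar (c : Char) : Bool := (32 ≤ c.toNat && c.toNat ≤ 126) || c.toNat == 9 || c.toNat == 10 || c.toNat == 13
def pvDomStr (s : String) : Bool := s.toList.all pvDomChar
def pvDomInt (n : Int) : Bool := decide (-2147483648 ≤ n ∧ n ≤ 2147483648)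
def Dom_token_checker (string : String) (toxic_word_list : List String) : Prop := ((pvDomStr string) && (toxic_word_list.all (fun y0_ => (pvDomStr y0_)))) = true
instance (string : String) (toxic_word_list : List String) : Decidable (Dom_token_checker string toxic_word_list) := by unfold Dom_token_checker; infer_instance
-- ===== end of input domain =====

-- B tokenizes the string once and tests each toxic word against the token list
-- (single-token words by one set lookup) instead of scanning the whole padded
-- string once per toxic word.

-- ===== PORT A =====
-- Python string concatenation " " + x + " " is ported as List Char append
-- ' ' :: (… ++ [' ']); all str primitives are the exact PySem.Chars versions.
def token_checker (string : String) (toxic_word_list : List String) : List String :=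
  let l : List (List Char) := []
  let twl : List (List Char) :=
    toxic_word_list.map (fun x => ' ' :: (PySem.Chars.lower x.toList ++ [' ']))
  let s : List Char := ' ' :: (PySem.Chars.lower string.toList ++ [' '])
  let l := twl.foldl (fun acc w => if PySem.Chars.isIn w s then acc ++ [w] else acc) l
  let l := l.map (fun x => PySem.Chars.stripChars x [' '])
  l.map (fun cs => String.ofList cs)

-- ===== PORT B =====
-- Source B's  any(tokens[i:i+n] == parts for i in range(len(tokens)-n+1))
def pvHasSlice (tokens parts : List (List Char)) : Bool :=
  let n : Int := parts.length
  (PySem.List.pyRange 0 ((tokens.length : Int) - n + 1)).any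
    (fun i => PySem.List.slice tokens (some i) (some (i + n)) == parts)

-- Source B's  present(parts); parts[0] is parts.headI (split never returns []).
def pvPresent (tokens tokenSet parts : List (List Char)) : Bool :=
  if parts.length == 1 then tokenSet.contains parts.headI
  else pvHasSlice tokens parts

def token_checker_alt (string : String) (toxic_word_list : List String) : List String :=
  let tokens := PySem.Chars.splitOn (PySem.Chars.lower string.toList) [' ']
  let tokenSet := PySem.Set.ofList tokens
  (toxic_word_list.filter
      (fun w => pvPresent tokens tokenSet
        (PySem.Chars.splitOn (PySem.Chars.lower w.toList) [' ']))).map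
    (fun w => String.ofList (PySem.Chars.stripChars (PySem.Chars.lower w.toList) [' ']))

-- ===== PRECONDITION & SPEC =====
def Spec_token_checker (string : String) (toxic_word_list : List String) (out : List String) : Prop := out = token_checker_alt string toxic_word_list
instance (string : String) (toxic_word_list : List String) (out : List String) : Decidable (Spec_token_checker string toxic_word_list out) := by unfold Spec_token_checker; infer_instance

-- ===== CLAIM (what is proved, stated in full; the proofs are below) =====
def Claim_equal_token_checker : Prop := ∀ (string : String) (toxic_word_list : List String), Dom_token_checker string toxic_word_list → Spec_token_checker string toxic_word_list (token_checker string toxic_word_list)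

-- ===== LEMMAS AND PROOFS =====
def pvToks : List Char → List (List Char)
  | [] => [[]]
  | c :: rest =>
    if c = ' ' then [] :: pvToks rest
    else
      match pvToks rest with
      | t :: ts => (c :: t) :: ts
      | [] => [[c]]

theorem pvToks_ne_nil (cs : List Char) : pvToks cs ≠ [] := by
  induction cs with
  | nil => simp [pvToks]
  | cons c rest ih =>
    simp only [pvToks]
    split
    · simp
    · rcases h : pvToks rest with _ | ⟨t, ts⟩
      · exact absurd h ih
      · simp [h]

theorem pvToks_append_space (x y : List Char) :
    pvToks (x ++ ' ' :: y) = pvToks x ++ pvToks y := by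
  induction x with
  | nil => simp [pvToks]
  | cons c rest ih =>
    simp only [List.cons_append, pvToks, ih]
    split
    · rfl
    · rcases h : pvToks rest with _ | ⟨t, ts⟩
      · exact absurd h (pvToks_ne_nil rest)
      · simp [h]

def pvJoinSp : List (List Char) → List Char
  | [] => []
  | [t] => t
  | t :: ts => t ++ ' ' :: pvJoinSp ts

theorem pvJoinSp_cons (t : List Char) (ts : List (List Char)) (h : ts ≠ []) :
    pvJoinSp (t :: ts) = t ++ ' ' :: pvJoinSp ts := by
  rcases ts with _ | ⟨u, us⟩
  · exact absurd rfl h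
  · rfl

theorem pvJoinSp_pvToks (cs : List Char) : pvJoinSp (pvToks cs) = cs := by
  induction cs with
  | nil => rfl
  | cons c rest ih =>
    simp only [pvToks]
    split
    · rename_i hc
      rw [pvJoinSp_cons _ _ (pvToks_ne_nil rest), ih, hc]
      rfl
    · rcases h : pvToks rest with _ | ⟨t, ts⟩
      · exact absurd h (pvToks_ne_nil rest)
      · rw [h] at ih
        rcases ts with _ | ⟨u, us⟩
        · simpa [pvJoinSp] using ih
        · rw [pvJoinSp_cons _ _ (by simp)]
          rw [pvJoinSp_cons _ _ (by simp)] at ih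
          simp [← ih]

theorem pvJoinSp_append (A B : List (List Char)) (hA : A ≠ []) (hB : B ≠ []) :
    pvJoinSp (A ++ B) = pvJoinSp A ++ ' ' :: pvJoinSp B := by
  induction A with
  | nil => exact absurd rfl hA
  | cons t ts ih =>
    rcases ts with _ | ⟨u, us⟩
    · rw [List.cons_append, List.nil_append, pvJoinSp_cons _ _ hB]
      rfl
    · rw [List.cons_append, pvJoinSp_cons _ _ (by simp), pvJoinSp_cons _ _ (by simp),
        ih (by simp)]
      simp

theorem pvSplitOn_go_spec (fuel : Nat) (l cur : List Char) (acc : List (List Char))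
    (h : l.length < fuel) :
    PySem.Chars.splitOn.go [' '] fuel l cur acc =
      acc.reverse ++ ((cur.reverse ++ (pvToks l).headI) :: (pvToks l).tail) := by
  induction fuel generalizing l cur acc with
  | zero => omega
  | succ fuel ih =>
    rcases l with _ | ⟨c, rest⟩
    · simp [PySem.Chars.splitOn.go, pvToks]
    · by_cases hc : c = ' '
      · subst hc
        simp only [PySem.Chars.splitOn.go, List.isPrefixOf, BEq.rfl, Bool.true_and,
          List.isPrefixOf_nil_left, if_pos, List.length_cons, List.drop_succ_cons,
          List.drop_zero]
        simp only [List.length_nil, List.drop_zero]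
        rw [ih rest [] (cur.reverse :: acc) (by simpa using Nat.lt_of_succ_lt_succ (by simpa using h))]
        rcases ht : pvToks rest with _ | ⟨t, ts⟩
        · exact absurd ht (pvToks_ne_nil rest)
        · simp [pvToks, ht]
      · rw [show PySem.Chars.splitOn.go [' '] (fuel+1) (c :: rest) cur acc =
              PySem.Chars.splitOn.go [' '] fuel rest (c :: cur) acc by
            simp [PySem.Chars.splitOn.go, List.isPrefixOf, hc]
            intro hh; exact absurd hh.symm hc]
        rw [ih rest (c :: cur) acc (by simpa using Nat.lt_of_succ_lt_succ (by simpa using h))]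
        rcases ht : pvToks rest with _ | ⟨t, ts⟩
        · exact absurd ht (pvToks_ne_nil rest)
        · simp [pvToks, hc, ht]

theorem pvSplitOn_eq_pvToks (cs : List Char) :
    PySem.Chars.splitOn cs [' '] = pvToks cs := by
  rw [PySem.Chars.splitOn, pvSplitOn_go_spec (cs.length + 1) cs [] [] (by omega)]
  rcases ht : pvToks cs with _ | ⟨t, ts⟩
  · exact absurd ht (pvToks_ne_nil cs)
  · simp

theorem pvPad_infix_iff (w s : List Char) :
    (' ' :: (w ++ [' '])) <:+: (' ' :: (s ++ [' '])) ↔ pvToks w <:+: pvToks s := by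
  constructor
  · rintro ⟨p, q, hpq⟩
    have hL : pvToks (p ++ ' ' :: (w ++ ' ' :: q)) = pvToks p ++ pvToks w ++ pvToks q := by
      rw [pvToks_append_space, pvToks_append_space]
      simp [List.append_assoc]
    have hshape : p ++ ' ' :: (w ++ ' ' :: q) = ' ' :: (s ++ [' ']) := by
      simpa [List.append_assoc] using hpq
    have hR : pvToks (' ' :: (s ++ [' '])) = [] :: (pvToks s ++ [[]]) := by
      have : (' ' :: (s ++ [' '])) = ([] : List Char) ++ ' ' :: (s ++ ' ' :: []) := by simp
      rw [this, pvToks_append_space, pvToks_append_space]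
      simp [pvToks]
    rw [hshape, hR] at hL
    rcases hp : pvToks p with _ | ⟨a, P⟩
    · exact absurd hp (pvToks_ne_nil p)
    · rw [hp] at hL
      simp only [List.cons_append, List.cons.injEq] at hL
      obtain ⟨-, hL⟩ := hL
      rcases (List.eq_nil_or_concat (pvToks q)) with hq | ⟨Q, b, hq⟩
      · exact absurd hq (pvToks_ne_nil q)
      · rw [hq] at hL
        have h2 : (P ++ pvToks w ++ Q) ++ [b] = pvToks s ++ [[]] := by
          simpa [List.append_assoc] using hL.symm
        obtain ⟨h3, -⟩ := List.append_inj' h2 rfl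
        exact ⟨P, Q, by simpa [List.append_assoc] using h3⟩
  · rintro ⟨A, B, hAB⟩
    have hs : s = pvJoinSp (A ++ pvToks w ++ B) := by rw [hAB, pvJoinSp_pvToks]
    rcases eq_or_ne A [] with hA | hA <;> rcases eq_or_ne B [] with hB | hB
    · subst hA hB
      simp only [List.nil_append, List.append_nil] at hs
      rw [pvJoinSp_pvToks] at hs
      subst hs; exact List.infix_refl _
    · subst hA
      simp only [List.nil_append] at hs
      rw [pvJoinSp_append _ _ (pvToks_ne_nil w) hB, pvJoinSp_pvToks] at hs
      exact ⟨[], pvJoinSp B ++ [' '], by simp [hs, List.append_assoc]⟩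
    · subst hB
      simp only [List.append_nil] at hs
      rw [pvJoinSp_append _ _ hA (pvToks_ne_nil w), pvJoinSp_pvToks] at hs
      exact ⟨' ' :: pvJoinSp A, [], by simp [hs, List.append_assoc]⟩
    · rw [pvJoinSp_append _ _ (by simp [hA]) hB,
        pvJoinSp_append _ _ hA (pvToks_ne_nil w), pvJoinSp_pvToks] at hs
      exact ⟨' ' :: pvJoinSp A, pvJoinSp B ++ [' '], by simp [hs, List.append_assoc]⟩

theorem pvInfix_iff_drop_take {α : Type} (t l : List α) :
    t <:+: l ↔ ∃ i : Nat, i + t.length ≤ l.length ∧ (l.drop i).take t.length = t := by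
  constructor
  · rintro ⟨p, q, hpq⟩
    refine ⟨p.length, ?_, ?_⟩
    · have := congrArg List.length hpq
      simp at this; omega
    · rw [← hpq]
      simp [List.drop_append, List.take_append]
  · rintro ⟨i, hle, ht⟩
    refine ⟨l.take i, (l.drop i).drop t.length, ?_⟩
    conv_rhs => rw [← List.take_append_drop i l]
    rw [List.append_assoc]
    congr 1
    have h2 := List.take_append_drop t.length (l.drop i)
    rw [ht] at h2
    exact h2


theorem pvHasSlice_eq (tokens parts : List (List Char)) (hp : parts ≠ []) :
    pvHasSlice tokens parts = decide (parts <:+: tokens) := by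
  unfold pvHasSlice
  simp only [List.any_eq_true, PySem.List.mem_pyRange_one, beq_iff_eq]
  rw [Bool.eq_iff_iff]
  simp only [List.any_eq_true, decide_eq_true_eq, PySem.List.mem_pyRange_one]
  rw [pvInfix_iff_drop_take]
  constructor
  · rintro ⟨i, ⟨h0, hlt⟩, hslice⟩
    lift i to Nat using h0 with k
    refine ⟨k, by exact_mod_cast (by omega : (k : Int) + parts.length ≤ tokens.length), ?_⟩
    rw [show ((k : Int) + parts.length) = ((k + parts.length : Nat) : Int) by push_cast; ring,
      PySem.List.slice_natCast] at hslice
    simpa [Nat.add_sub_cancel_left] using hslice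
  · rintro ⟨k, hle, htk⟩
    refine ⟨(k : Int), ⟨by positivity, by exact_mod_cast (by omega : (k : Int) < tokens.length - parts.length + 1)⟩, ?_⟩
    rw [show ((k : Int) + parts.length) = ((k + parts.length : Nat) : Int) by push_cast; ring,
      PySem.List.slice_natCast]
    simpa [Nat.add_sub_cancel_left] using htk

theorem pvPresent_eq (tokens parts : List (List Char)) (hp : parts ≠ []) :
    pvPresent tokens (PySem.Set.ofList tokens) parts = decide (parts <:+: tokens) := by
  unfold pvPresent
  by_cases h1 : parts.length = 1
  · rcases parts with _ | ⟨t, _ | _⟩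
    · exact absurd rfl hp
    · rw [if_pos (by simp), Bool.eq_iff_iff]
      simp [PySem.Set.mem_ofList, List.singleton_infix_iff]
    · simp at h1
  · rw [if_neg (by simpa using h1)]
    exact pvHasSlice_eq tokens parts hp

theorem pvStrip_pad (cs : List Char) :
    PySem.Chars.stripChars (' ' :: (cs ++ [' '])) [' '] = PySem.Chars.stripChars cs [' '] := by
  unfold PySem.Chars.stripChars
  dsimp only
  have hdw : ∀ (x : List Char), List.dropWhile (fun c => [' '].contains c) (' ' :: x)
      = List.dropWhile (fun c => [' '].contains c) x := by
    intro x; simp [List.dropWhile_cons]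
  rw [hdw]
  rcases h : List.dropWhile (fun c => [' '].contains c) cs with _ | ⟨d, ds⟩
  · rw [List.dropWhile_append, h]
    simp
  · rw [List.dropWhile_append, h]
    simp only [List.isEmpty_cons, List.reverse_append, List.reverse_cons, List.reverse_nil,
      List.nil_append, List.cons_append, if_neg, Bool.false_eq_true, not_false_iff]
    rw [hdw]

theorem pvPred_eq (s w : List Char) :
    PySem.Chars.isIn (' ' :: (PySem.Chars.lower w ++ [' ']))
        (' ' :: (PySem.Chars.lower s ++ [' '])) =
      pvPresent (PySem.Chars.splitOn (PySem.Chars.lower s) [' '])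
        (PySem.Set.ofList (PySem.Chars.splitOn (PySem.Chars.lower s) [' ']))
        (PySem.Chars.splitOn (PySem.Chars.lower w) [' ']) := by
  rw [pvSplitOn_eq_pvToks, pvSplitOn_eq_pvToks,
    pvPresent_eq _ _ (pvToks_ne_nil _), Bool.eq_iff_iff]
  simp only [PySem.Chars.isIn_iff_infix, decide_eq_true_eq]
  exact pvPad_infix_iff _ _

-- ===== VERDICT (by name: the statement is the Claim_ definition above) =====
theorem token_checker_spec : Claim_equal_token_checker := by
  intro s tl _
  unfold Spec_token_checker token_checker token_checker_alt
  dsimp only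
  simp only [PySem.List.foldl_append_if, List.nil_append, List.map_map, List.map_id,
    List.filter_map]
  rw [List.filter_congr (fun w _ => by
    simpa [Function.comp] using pvPred_eq s.toList w.toList)]
  exact (List.map_congr_left (fun w _ => by
    simp [Function.comp, pvStrip_pad])).symm
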